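-- pv_equiv track=rewrite | github.com/Magistri-Codicis/spotify-playlist-generator-python | Artist/ArtistList.py | parseArtists
-- ===== SOURCE A (Python) =====
-- def parseArtists(text):
--     queries = []
--     for line in text.splitlines():
--         for comma in line.split(','):
--             for semi in comma.split(';'):
--                 if semi.strip() != '' and semi.strip() != ',' and semi.strip() != ';':
--                     queries.append(semi.strip())
--     return queries
-- ===== SOURCE B (Python) =====
-- def parseArtists(text):
--     s = text.replace(',', '\n').replace(';', '\n')
--     queries = []
--     for line in s.splitlines():
--         t = line.strip()
--         if t:
--             queries.append(t)
--     return queries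
-- ===== Notes on version B (the rewrite author's own statement) =====
-- stated objective: simpler
-- what changed: B replaces A's three nested split loops (splitlines, then comma split, then semicolon split) and the redundant comparisons against single-delimiter strings by normalizing comma and semicolon delimiters to newlines with str.replace and doing a single splitlines/strip/filter pass.
import Mathlib
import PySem

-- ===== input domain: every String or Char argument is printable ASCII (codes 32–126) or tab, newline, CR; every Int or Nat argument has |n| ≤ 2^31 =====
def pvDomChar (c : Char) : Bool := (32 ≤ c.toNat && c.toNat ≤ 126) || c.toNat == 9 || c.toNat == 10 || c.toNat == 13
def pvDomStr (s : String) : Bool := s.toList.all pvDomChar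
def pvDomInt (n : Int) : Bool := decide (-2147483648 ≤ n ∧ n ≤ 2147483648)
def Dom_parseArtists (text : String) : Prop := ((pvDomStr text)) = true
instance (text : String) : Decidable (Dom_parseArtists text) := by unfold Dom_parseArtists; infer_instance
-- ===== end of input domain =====

-- B replaces A's nested splitlines/comma-split/semicolon-split loops by normalizing both
-- delimiters to newlines first and doing one splitlines pass (objective: simpler decomposition).

-- ===== PORT A =====
-- A: for line in text.splitlines(): for comma in line.split(','): for semi in comma.split(';'):
--      if semi.strip() != '' and != ',' and != ';': queries.append(semi.strip())
def parseArtists (text : String) : List String :=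
  (PySem.Str.splitlines text).foldl (fun queries line =>
    (PySem.Chars.splitOn line.toList [',']).foldl (fun queries comma =>
      (PySem.Chars.splitOn comma [';']).foldl (fun queries semi =>
        if PySem.Chars.strip semi ≠ [] ∧ PySem.Chars.strip semi ≠ [','] ∧
            PySem.Chars.strip semi ≠ [';'] then
          queries ++ [String.ofList (PySem.Chars.strip semi)]
        else queries) queries) queries) []

-- ===== PORT B =====
-- B: s = text.replace(',', '\n').replace(';', '\n');
--    [t for line in s.splitlines() for t in [line.strip()] if t]
def parseArtists_alt (text : String) : List String :=
  let s := PySem.Str.replace (PySem.Str.replace text "," "\n") ";" "\n"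
  (PySem.Str.splitlines s).foldl (fun queries line =>
    let t := PySem.Str.strip line
    if t ≠ "" then queries ++ [t] else queries) []

-- ===== PRECONDITION & SPEC =====
def Spec_parseArtists (text : String) (out : List String) : Prop := out = parseArtists_alt text
instance (text : String) (out : List String) : Decidable (Spec_parseArtists text out) := by
  unfold Spec_parseArtists; infer_instance

-- ===== CLAIM (what is proved, stated in full; the proofs are below) =====
def Claim_equal_parseArtists : Prop :=
  ∀ (text : String), Dom_parseArtists text → Spec_parseArtists text (parseArtists text)

-- ===== LEMMAS AND PROOFS =====

-- split a char list on a predicate, keeping empty pieces: (first piece, remaining pieces)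
def pvSp (p : Char → Bool) : List Char → List Char × List (List Char)
  | [] => ([], [])
  | c :: r =>
    let hw := pvSp p r
    if p c then ([], hw.1 :: hw.2) else (c :: hw.1, hw.2)

def pvP (p : Char → Bool) (s : List Char) : List (List Char) :=
  (pvSp p s).1 :: (pvSp p s).2

def pvNL (c : Char) : Bool := c == '\n' || c == '\r'
def pvDelimAll (c : Char) : Bool := c == ',' || c == ';' || c == '\n' || c == '\r'

-- keep a piece iff it strips to something non-empty
def pvKeepS (t : List Char) : List String :=
  if PySem.Chars.strip t = [] then [] else [String.ofList (PySem.Chars.strip t)]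

def pvSub (c d : Char) (x : Char) : Char := if x == c then d else x

lemma pvChar_eq_of_toNat {c d : Char} (h : c.toNat = d.toNat) : c = d :=
  Char.ext (UInt32.toNat_inj.mp h)

lemma pvChar_eq_iff (c d : Char) : c = d ↔ c.toNat = d.toNat :=
  ⟨fun h => h ▸ rfl, pvChar_eq_of_toNat⟩

lemma sogo (c : Char) : ∀ (fuel : Nat) (l cur : List Char) (acc : List (List Char)),
    l.length ≤ fuel →
    PySem.Chars.splitOn.go [c] fuel l cur acc
      = acc.reverse ++ (cur.reverse ++ (pvSp (· == c) l).1) :: (pvSp (· == c) l).2 := by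
  intro fuel
  induction fuel with
  | zero =>
    intro l cur acc h
    simp only [Nat.le_zero, List.length_eq_zero_iff] at h
    subst h
    simp [PySem.Chars.splitOn.go, pvSp]
  | succ n ih =>
    intro l cur acc h
    cases l with
    | nil => rw [PySem.Chars.splitOn.go.eq_def]; simp [pvSp]
    | cons x t =>
      rw [PySem.Chars.splitOn.go.eq_def]
      by_cases hx : x = c
      · simp [hx, List.isPrefixOf, ih t _ _ (by simpa using h), pvSp]
      · simp only [List.isPrefixOf, Bool.and_eq_true, beq_iff_eq, and_true]
        rw [if_neg (by exact fun hh => hx hh.symm)]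
        simp [ih t _ _ (by simpa using h), pvSp, hx]

lemma splitOn_char (c : Char) (l : List Char) :
    PySem.Chars.splitOn l [c] = pvP (· == c) l := by
  rw [PySem.Chars.splitOn, sogo c (l.length + 1) l [] [] (by omega)]
  simp [pvP]

lemma slgo {α : Type} (G : List Char → List α) (hG : G [] = [])
    (isB : Char → Bool) :
    ∀ (n : Nat) (s : List Char), s.length ≤ n → (∀ c ∈ s, isB c = pvNL c) →
    ∀ (cur : List Char) (acc : List (List Char)),
    (PySem.Chars.splitlines.go isB s cur acc).flatMap G
      = acc.reverse.flatMap G ++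
        (G (cur.reverse ++ (pvSp pvNL s).1) ++ ((pvSp pvNL s).2).flatMap G) := by
  intro n
  induction n with
  | zero =>
    intro s hlen _ cur acc
    simp only [Nat.le_zero, List.length_eq_zero_iff] at hlen
    subst hlen
    rw [PySem.Chars.splitlines.go.eq_def]
    simp [pvSp]
    by_cases hc : cur = [] <;> simp [hc, hG]
  | succ n ih =>
    intro s hlen hdom cur acc
    rw [PySem.Chars.splitlines.go.eq_def]
    split
    · simp [pvSp]
      by_cases hc : cur = [] <;> simp [hc, hG]
    · rename_i rest
      rw [ih rest (by simp at hlen; omega) (fun c hc => hdom c (by simp [hc])) [] _]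
      simp [pvSp, pvNL, hG]
    · rename_i c rest hne
      by_cases hb : isB c = true
      · rw [if_pos hb]
        rw [ih rest (by simp at hlen; omega) (fun c hc => hdom c (by simp [hc])) [] _]
        have hnl : pvNL c = true := by rw [← hdom c (by simp), hb]
        simp [pvSp, hnl]
      · rw [if_neg hb]
        rw [ih rest (by simp at hlen; omega) (fun c hc => hdom c (by simp [hc])) (c :: cur) acc]
        have hnl : pvNL c = false := by rw [← hdom c (by simp)]; simpa using hb
        simp [pvSp, hnl]

lemma pvP_union (p1 p2 : Char → Bool) (s : List Char) :
    pvP (fun c => p1 c || p2 c) s = (pvP p1 s).flatMap (pvP p2) := by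
  induction s with
  | nil => simp [pvP, pvSp]
  | cons c r ih =>
    by_cases h1 : p1 c = true
    · simp [pvP, pvSp, h1] at ih ⊢; exact ih
    · by_cases h2 : p2 c = true
      · simp [pvP, pvSp, h1, h2] at ih ⊢; exact ih
      · simp [pvP, pvSp, h1, h2] at ih ⊢; exact ih

lemma pvSp_mem (p : Char → Bool) (s : List Char) :
    (∀ x ∈ (pvSp p s).1, x ∈ s ∧ p x = false) ∧
    (∀ t ∈ (pvSp p s).2, ∀ x ∈ t, x ∈ s ∧ p x = false) := by
  induction s with
  | nil => simp [pvSp]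
  | cons c r ih =>
    by_cases h : p c = true
    · simp only [pvSp, h, if_pos]
      refine ⟨by simp, ?_⟩
      intro t ht x hx
      rcases List.mem_cons.mp ht with rfl | ht
      · rcases ih.1 x hx with ⟨h1, h2⟩
        exact ⟨by simp [h1], h2⟩
      · rcases ih.2 t ht x hx with ⟨h1, h2⟩
        exact ⟨by simp [h1], h2⟩
    · rw [Bool.not_eq_true] at h
      simp only [pvSp, h]
      refine ⟨?_, ?_⟩
      · intro x hx
        rcases List.mem_cons.mp hx with rfl | hx
        · simp [h]
        · rcases ih.1 x hx with ⟨h1, h2⟩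
          exact ⟨by simp [h1], h2⟩
      · intro t ht x hx
        rcases ih.2 t ht x hx with ⟨h1, h2⟩
        exact ⟨by simp [h1], h2⟩

lemma pv_strip_subset (t : List Char) : ∀ x ∈ PySem.Chars.strip t, x ∈ t := by
  intro x hx
  simp only [PySem.Chars.strip, PySem.Chars.rstrip, PySem.Chars.lstrip] at hx
  rw [List.mem_reverse] at hx
  have h1 := (List.dropWhile_sublist (l := (List.dropWhile PySem.Chars.isspace t).reverse)
    PySem.Chars.isspace).subset hx
  rw [List.mem_reverse] at h1
  exact (List.dropWhile_sublist (l := t) PySem.Chars.isspace).subset h1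

lemma pv_ofList_ne_empty (x : List Char) : (String.ofList x ≠ "") ↔ x ≠ [] := by
  constructor
  · intro h hx; exact h (by rw [hx])
  · intro h hx
    have := congrArg String.toList hx
    simp at this
    exact h this

lemma pvKeepS_nil : pvKeepS [] = [] := by decide

-- A's triple test collapses to non-emptiness on pieces that contain no ',' and no ';'
lemma pvKeepA_eq (semi : List Char) (hc : (',' : Char) ∉ semi) (hs : (';' : Char) ∉ semi) :
    (if PySem.Chars.strip semi ≠ [] ∧ PySem.Chars.strip semi ≠ [','] ∧
        PySem.Chars.strip semi ≠ [';'] then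
      [String.ofList (PySem.Chars.strip semi)] else []) = pvKeepS semi := by
  unfold pvKeepS
  by_cases h : PySem.Chars.strip semi = []
  · simp [h]
  · rw [if_neg h]
    rw [if_pos]
    refine ⟨h, ?_, ?_⟩
    · intro heq
      exact hc (pv_strip_subset semi ',' (by rw [heq]; simp))
    · intro heq
      exact hs (pv_strip_subset semi ';' (by rw [heq]; simp))

-- per-char facts for B's two replaces
lemma pvSub_delim (c : Char) :
    pvDelimAll c = pvNL (pvSub ';' '\n' (pvSub ',' '\n' c)) ∧
    (pvDelimAll c = false → pvSub ';' '\n' (pvSub ',' '\n' c) = c) := by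
  by_cases h1 : c = ','
  · subst h1; exact ⟨by decide, fun h => absurd h (by decide)⟩
  · by_cases h2 : c = ';'
    · subst h2; exact ⟨by decide, fun h => absurd h (by decide)⟩
    · have e1 : pvSub ',' '\n' c = c := by simp [pvSub, h1]
      have e2 : pvSub ';' '\n' c = c := by simp [pvSub, h2]
      rw [e1, e2]
      constructor
      · rw [pvDelimAll, pvNL, beq_eq_false_iff_ne.mpr h1, beq_eq_false_iff_ne.mpr h2]
        simp
      · intro _; rfl

lemma pvSp_map_sub (s : List Char) :
    pvSp pvNL (s.map (fun x => pvSub ';' '\n' (pvSub ',' '\n' x))) = pvSp pvDelimAll s := by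
  induction s with
  | nil => rfl
  | cons c r ih =>
    rcases pvSub_delim c with ⟨h1, h2⟩
    simp only [List.map_cons]
    by_cases hd : pvDelimAll c = true
    · simp [pvSp, ih, ← h1, hd]
    · rw [Bool.not_eq_true] at hd
      rw [h2 hd]
      rw [h2 hd] at h1
      simp [pvSp, ih, ← h1, hd]

lemma pv_replace_char (c d : Char) :
    ∀ (fuel : Nat) (l acc : List Char), l.length ≤ fuel →
    PySem.Chars.replace.go [c] [d] fuel l acc = acc.reverse ++ l.map (pvSub c d) := by
  intro fuel
  induction fuel with
  | zero =>
    intro l acc h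
    simp only [Nat.le_zero, List.length_eq_zero_iff] at h
    simp [h, PySem.Chars.replace.go]
  | succ n ih =>
    intro l acc h
    cases l with
    | nil => simp [PySem.Chars.replace.go]
    | cons x t =>
      rw [PySem.Chars.replace.go]
      by_cases hx : x = c
      · simp [hx, List.isPrefixOf, ih t _ (by simpa using h), pvSub]
      · simp [List.isPrefixOf, hx, ih t _ (by simpa using h), pvSub]
        exact fun h => absurd h.symm hx

lemma pv_replace (c d : Char) (s : List Char) :
    PySem.Chars.replace s [c] [d] = s.map (pvSub c d) := by
  simp [PySem.Chars.replace, pv_replace_char c d s.length s [] le_rfl]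

-- the break-character test of splitlines agrees with pvNL on domain characters
lemma pv_isB_eq (c : Char) (hd : pvDomChar c = true) :
    ((decide (c.toNat = 10) || decide (c.toNat = 13) || decide (c.toNat = 11) ||
      decide (c.toNat = 12) || decide (c.toNat = 28) || decide (c.toNat = 29) ||
      decide (c.toNat = 30) || decide (c.toNat = 133) || decide (c.toNat = 8232) ||
      decide (c.toNat = 8233)) : Bool) = pvNL c := by
  simp only [pvDomChar, Bool.or_eq_true, Bool.and_eq_true, decide_eq_true_eq,
    beq_iff_eq] at hd
  rw [Bool.eq_iff_iff]
  simp only [pvNL, Bool.or_eq_true, decide_eq_true_eq, beq_iff_eq,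
    pvChar_eq_iff c '\n', pvChar_eq_iff c '\r']
  have h10 : ('\n').toNat = 10 := rfl
  have h13 : ('\r').toNat = 13 := rfl
  rw [h10, h13]
  omega

-- both ports compute pvKeepS over the pieces of the split on {',', ';', '\n', '\r'}
def pvGA (l : List Char) : List String :=
  (pvP (· == ',') l).flatMap (fun comma => (pvP (· == ';') comma).flatMap pvKeepS)

lemma pvPred_eq :
    pvDelimAll = (fun c => (pvNL c || (c == ',')) || (c == ';')) := by
  funext c
  simp only [pvDelimAll, pvNL]
  cases h1 : (c == ',') <;> cases h2 : (c == ';') <;> cases h3 : (c == '\n') <;>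
    cases h4 : (c == '\x0d') <;> rfl

lemma pv_common_eq (s0 : List Char) :
    (pvP pvDelimAll s0).flatMap pvKeepS = (pvP pvNL s0).flatMap pvGA := by
  rw [pvPred_eq, pvP_union (fun c => pvNL c || (c == ',')) (· == ';') s0,
    List.flatMap_assoc, pvP_union pvNL (· == ',') s0, List.flatMap_assoc]
  rfl

lemma pv_dom_chars (text : String) (hdom : Dom_parseArtists text) :
    ∀ c ∈ text.toList, pvDomChar c = true := by
  have h : pvDomStr text = true := hdom
  simpa [pvDomStr, List.all_eq_true] using h

lemma parseArtists_eq_spec (text : String) (hdom : Dom_parseArtists text) :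
    parseArtists text = (pvP pvDelimAll text.toList).flatMap pvKeepS := by
  unfold parseArtists
  rw [PySem.Str.splitlines, List.foldl_map]
  have hstep : (fun (queries : List String) (semi : List Char) =>
      if PySem.Chars.strip semi ≠ [] ∧ PySem.Chars.strip semi ≠ [','] ∧
          PySem.Chars.strip semi ≠ [';'] then
        queries ++ [String.ofList (PySem.Chars.strip semi)]
      else queries)
      = (fun queries semi => queries ++
          (if PySem.Chars.strip semi ≠ [] ∧ PySem.Chars.strip semi ≠ [','] ∧
              PySem.Chars.strip semi ≠ [';'] then
            [String.ofList (PySem.Chars.strip semi)] else [])) := by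
    funext q1 semi
    by_cases h : PySem.Chars.strip semi ≠ [] ∧ PySem.Chars.strip semi ≠ [','] ∧
        PySem.Chars.strip semi ≠ [';'] <;> simp [h]
  have hmid : ∀ (l : List Char), (fun (queries : List String) (comma : List Char) =>
      (PySem.Chars.splitOn comma [';']).foldl (fun queries semi =>
        if PySem.Chars.strip semi ≠ [] ∧ PySem.Chars.strip semi ≠ [','] ∧
            PySem.Chars.strip semi ≠ [';'] then
          queries ++ [String.ofList (PySem.Chars.strip semi)]
        else queries) queries)
      = (fun queries comma => queries ++ (pvP (· == ';') comma).flatMap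
          (fun semi => if PySem.Chars.strip semi ≠ [] ∧ PySem.Chars.strip semi ≠ [','] ∧
              PySem.Chars.strip semi ≠ [';'] then
            [String.ofList (PySem.Chars.strip semi)] else [])) := by
    intro _
    funext q comma
    rw [splitOn_char, hstep, PySem.List.foldl_append_eq_flatMap]
  have hfun : (fun (queries : List String) (l : List Char) =>
      (PySem.Chars.splitOn (String.ofList l).toList [',']).foldl (fun queries comma =>
        (PySem.Chars.splitOn comma [';']).foldl (fun queries semi =>
          if PySem.Chars.strip semi ≠ [] ∧ PySem.Chars.strip semi ≠ [','] ∧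
              PySem.Chars.strip semi ≠ [';'] then
            queries ++ [String.ofList (PySem.Chars.strip semi)]
          else queries) queries) queries)
      = (fun queries l => queries ++ pvGA l) := by
    funext q l
    rw [String.toList_ofList, splitOn_char, hmid l, PySem.List.foldl_append_eq_flatMap]
    unfold pvGA
    congr 1
    apply List.flatMap_congr
    intro comma hcm
    apply List.flatMap_congr
    intro semi hsemi
    have hno : (∀ x ∈ semi, x ∈ comma ∧ (x == ';') = false) := by
      rcases List.mem_cons.mp hsemi with rfl | hsemi
      · exact (pvSp_mem (· == ';') comma).1
      · exact (pvSp_mem (· == ';') comma).2 semi hsemi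
    have hcomma : ∀ x ∈ comma, (x == ',') = false := by
      intro x hx
      rcases List.mem_cons.mp hcm with heq | hcm
      · exact ((pvSp_mem (· == ',') l).1 x (heq ▸ hx)).2
      · exact ((pvSp_mem (· == ',') l).2 comma hcm x hx).2
    apply pvKeepA_eq
    · intro hmem
      have := hcomma ',' ((hno ',' hmem).1)
      simp at this
    · intro hmem
      have := (hno ';' hmem).2
      simp at this
  rw [hfun, PySem.List.foldl_append_eq_flatMap, List.nil_append]
  rw [pv_common_eq]
  rw [PySem.Chars.splitlines]
  rw [slgo pvGA (by decide) _ text.toList.length text.toList le_rfl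
    (fun c hc => pv_isB_eq c (pv_dom_chars text hdom c hc)) [] []]
  simp [pvP]

lemma parseArtists_alt_eq_spec (text : String) (hdom : Dom_parseArtists text) :
    parseArtists_alt text = (pvP pvDelimAll text.toList).flatMap pvKeepS := by
  unfold parseArtists_alt
  simp only [PySem.Str.splitlines, List.foldl_map]
  have hstep : (fun (queries : List String) (l : List Char) =>
      let t := PySem.Str.strip (String.ofList l)
      if t ≠ "" then queries ++ [t] else queries)
      = (fun queries l => queries ++ pvKeepS l) := by
    funext q l
    simp only [PySem.Str.strip, String.toList_ofList]
    by_cases h : PySem.Chars.strip l = []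
    · simp [pvKeepS, h]
    · simp [pvKeepS, h, (pv_ofList_ne_empty (PySem.Chars.strip l)).mpr h]
  rw [hstep, PySem.List.foldl_append_eq_flatMap, List.nil_append]
  rw [PySem.Str.toList_replace, PySem.Str.toList_replace]
  rw [show (",".toList) = [','] from rfl, show (";".toList) = [';'] from rfl,
    show ("\n".toList) = ['\n'] from rfl]
  rw [pv_replace, pv_replace, List.map_map]
  have hsub : (pvSub ';' '\n' ∘ pvSub ',' '\n')
      = (fun x => pvSub ';' '\n' (pvSub ',' '\n' x)) := rfl
  rw [hsub]
  rw [PySem.Chars.splitlines]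
  have hIsB : ∀ c ∈ text.toList.map (fun x => pvSub ';' '\n' (pvSub ',' '\n' x)),
      (fun c =>
        have n := c.toNat
        (decide (n = 10) || decide (n = 13) || decide (n = 11) ||
          decide (n = 12) || decide (n = 28) || decide (n = 29) ||
          decide (n = 30) || decide (n = 133) || decide (n = 8232) ||
          decide (n = 8233) : Bool)) c = pvNL c := by
    intro c hc
    rcases List.mem_map.mp hc with ⟨x, hx, rfl⟩
    have hdx : pvDomChar x = true := pv_dom_chars text hdom x hx
    by_cases h1 : x = ','
    · subst h1; decide
    · by_cases h2 : x = ';'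
      · subst h2; decide
      · rw [show pvSub ';' '\n' (pvSub ',' '\n' x) = x from by simp [pvSub, h1, h2]]
        exact pv_isB_eq x hdx
  rw [slgo pvKeepS pvKeepS_nil _ _ _ le_rfl hIsB [] []]
  rw [pvSp_map_sub]
  simp [pvP]

-- ===== VERDICT (by name: the statement is the Claim_ definition above) =====
theorem parseArtists_spec : Claim_equal_parseArtists := by
  intro text hdom
  unfold Spec_parseArtists
  rw [parseArtists_eq_spec text hdom, parseArtists_alt_eq_spec text hdom]
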